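-- pv_equiv track=rewrite | github.com/wespiper/ufr-ds | ufr_ds/engine_suggest.py | _expand_rule
-- ===== SOURCE A (Python) =====
-- from typing import Dict, List, Set, Tuple
--
-- Token = str
--
-- RuleMap = Dict[str, Tuple[Token, ...]]
--
-- def _expand_rule(rule: str, rules: RuleMap, seen: Set[str] | None = None) -> List[Token]:
--     if seen is None:
--         seen = set()
--     if rule in seen:
--         return []
--     seen.add(rule)
--     out: List[Token] = []
--     rhs = rules.get(rule)
--     if not rhs:
--         return []
--     for sym in rhs:
--         if sym in rules:
--             out.extend(_expand_rule(sym, rules, seen))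
--         else:
--             out.append(sym)
--     return out
-- ===== SOURCE B (Python) =====
-- from typing import Dict, List, Set, Tuple
--
-- Token = str
-- RuleMap = Dict[str, Tuple[Token, ...]]
--
-- def _expand_rule(rule: str, rules: RuleMap, seen: Set[str] | None = None) -> List[Token]:
--     if seen is None:
--         seen = set()
--     if rule in seen:
--         return []
--     seen.add(rule)
--     rhs = rules.get(rule)
--     if not rhs:
--         return []
--     out: List[Token] = []
--     stack = list(reversed(rhs))
--     while stack:
--         sym = stack.pop()
--         if sym in rules:
--             if sym not in seen:
--                 seen.add(sym)
--                 stack.extend(reversed(rules[sym]))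
--         else:
--             out.append(sym)
--     return out
-- ===== Notes on version B (the rewrite author's own statement) =====
-- stated objective: alternative
-- what changed: The recursive descent threading a shared seen-set is replaced by an iterative DFS with an explicit stack (rhs pushed in reverse), preserving the first-visit preorder and seen-set suppression.
import Mathlib
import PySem

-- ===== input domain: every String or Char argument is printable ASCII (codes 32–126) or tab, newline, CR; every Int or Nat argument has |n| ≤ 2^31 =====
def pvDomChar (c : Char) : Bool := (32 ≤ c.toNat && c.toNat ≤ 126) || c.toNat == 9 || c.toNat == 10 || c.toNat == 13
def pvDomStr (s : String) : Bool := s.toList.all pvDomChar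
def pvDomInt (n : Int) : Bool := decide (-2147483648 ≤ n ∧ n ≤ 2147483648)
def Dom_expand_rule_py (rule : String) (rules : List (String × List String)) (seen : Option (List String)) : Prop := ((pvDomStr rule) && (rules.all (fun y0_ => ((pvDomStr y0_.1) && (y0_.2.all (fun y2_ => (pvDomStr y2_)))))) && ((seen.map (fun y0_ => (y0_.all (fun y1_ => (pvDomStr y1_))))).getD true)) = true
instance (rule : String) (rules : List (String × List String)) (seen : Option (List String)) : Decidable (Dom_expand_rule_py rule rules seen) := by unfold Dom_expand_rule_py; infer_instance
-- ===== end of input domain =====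

-- B replaces A's recursion by an iterative explicit-stack DFS (alternative decomposition, same cost).
-- Both Pythons mutate the caller's `seen` set identically; the equivalence proved here is about the RETURN value.

-- ===== PORT A =====
-- A's recursion terminates because every recursive call happens under a strictly grown `seen`;
-- the port makes that explicit with a fuel argument rules.length + 1, which is always sufficient
-- (recursion depth ≤ number of distinct rule keys + 1) — a totality guard only, not an algorithm change.
mutual
-- _expand_rule's body (the recursive function itself)
def pvExpandA (rules : List (String × List String)) : Nat → String → List String → List String × List String
  | 0, _, seen => ([], seen)
  | f + 1, rule, seen =>
    if seen.contains rule then ([], seen)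
    else
      let seen1 := PySem.Set.add seen rule
      match (PySem.Dict.mk rules).get? rule with
      | none => ([], seen1)
      | some rhs => if rhs = [] then ([], seen1) else pvLoopA rules f rhs [] seen1
termination_by f _ _ => (f, 0)

-- the `for sym in rhs` loop, accumulating `out` and threading the mutated `seen`
def pvLoopA (rules : List (String × List String)) : Nat → List String → List String → List String → List String × List String
  | _, [], out, seen => (out, seen)
  | f, sym :: rest, out, seen =>
    if (PySem.Dict.mk rules).contains sym then
      let r := pvExpandA rules f sym seen
      pvLoopA rules f rest (out ++ r.1) r.2
    else pvLoopA rules f rest (out ++ [sym]) seen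
termination_by f rhs _ _ => (f, rhs.length + 1)
end

def expand_rule_py (rule : String) (rules : List (String × List String)) (seen : Option (List String)) : List String :=
  let seen0 : List String := match seen with | none => [] | some s => s
  (pvExpandA rules (rules.length + 1) rule seen0).1

-- ===== PORT B =====
-- termination measure helper for the stack loop: total size of the right-hand sides of still-unseen rules
def pvW (rules : List (String × List String)) (seen : List String) : Nat :=
  ((rules.filter (fun p => !seen.contains p.1)).map (fun p => p.2.length + 1)).sum

theorem pvW_cons (p : String × List String) (rs : List (String × List String)) (t : List String) :
    pvW (p :: rs) t = (if t.contains p.1 = true then 0 else p.2.length + 1) + pvW rs t := by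
  unfold pvW
  rw [List.filter_cons]
  by_cases h : t.contains p.1 = true
  · rw [h]; simp
  · have h' : t.contains p.1 = false := by simpa using h
    rw [h']; simp

theorem pvContains_add (s : List String) (x y : String) :
    List.contains (PySem.Set.add s x) y = (List.contains s y || y == x) := by
  simp only [PySem.Set.add, PySem.Set.contains_eq_listContains]
  by_cases h : s.contains x = true
  · rw [if_pos h]
    cases hxy : (y == x) with
    | true =>
      have : y = x := by simpa using hxy
      subst this
      rw [h]; simp
    | false => simp
  · rw [if_neg h]
    simp [Bool.beq_eq_decide_eq]

theorem pvW_le_of_subset (rules : List (String × List String)) (s s' : List String)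
    (h : ∀ x, s.contains x = true → s'.contains x = true) : pvW rules s' ≤ pvW rules s := by
  induction rules with
  | nil => simp [pvW]
  | cons p rs ih =>
    rw [pvW_cons, pvW_cons]
    have : (if s'.contains p.1 = true then 0 else p.2.length + 1) ≤
        (if s.contains p.1 = true then 0 else p.2.length + 1) := by
      by_cases hc : s.contains p.1 = true
      · rw [if_pos hc, if_pos (h _ hc)]
      · rw [if_neg hc]; split <;> omega
    omega

theorem pvW_add_lt (rules : List (String × List String)) (seen : List String) (sym : String) (rhs : List String)
    (h1 : seen.contains sym = false) (h2 : (PySem.Dict.mk rules).get? sym = some rhs) :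
    pvW rules (PySem.Set.add seen sym) + rhs.length + 1 ≤ pvW rules seen := by
  induction rules with
  | nil => simp [PySem.Dict.get?] at h2
  | cons p rs ih =>
    have hsub : ∀ x, List.contains seen x = true → List.contains (PySem.Set.add seen sym) x = true := by
      intro x hx; rw [pvContains_add, hx]; rfl
    have hmono : pvW rs (PySem.Set.add seen sym) ≤ pvW rs seen := pvW_le_of_subset rs seen _ hsub
    rw [PySem.Dict.get?_mk_cons] at h2
    rw [pvW_cons, pvW_cons]
    by_cases hk : (p.1 == sym) = true
    · have hk' : p.1 = sym := by simpa using hk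
      rw [if_pos hk, Option.some.injEq] at h2
      subst h2
      rw [hk', h1]
      have hT : List.contains (PySem.Set.add seen sym) sym = true := by
        rw [pvContains_add, h1]; simp
      rw [hT, if_pos rfl, if_neg (by simp)]
      omega
    · rw [if_neg (by simpa using hk)] at h2
      have hrec := ih h2
      have hkf : (p.1 == sym) = false := by simpa using hk
      have hsame : List.contains (PySem.Set.add seen sym) p.1 = List.contains seen p.1 := by
        rw [pvContains_add, hkf]; simp
      rw [hsame]
      omega

-- the while-stack loop of B: Python's list-as-stack (append/pop at the tail) is modelled with the
-- Lean list's HEAD as the stack top, so `stack.extend(reversed(rhs))` is exactly `rhs ++ rest`;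
-- `rules[sym]` is read as `(get? sym).getD []`, exact because it runs only under `sym in rules`.
def pvStackB (rules : List (String × List String)) : List String → List String → List String → List String
  | [], out, _ => out
  | sym :: rest, out, seen =>
    if h1 : (PySem.Dict.mk rules).contains sym = true then
      if h2 : seen.contains sym = true then pvStackB rules rest out seen
      else pvStackB rules (((PySem.Dict.mk rules).get? sym).getD [] ++ rest) out (PySem.Set.add seen sym)
    else pvStackB rules rest (out ++ [sym]) seen
termination_by stack _ seen => stack.length + pvW rules seen
decreasing_by
  · simp only [List.length_cons]; omega
  · have hs : ((PySem.Dict.mk rules).get? sym).isSome = true := by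
      rw [← PySem.Dict.contains_eq_isSome_get?]; exact h1
    obtain ⟨rhs, hrhs⟩ := Option.isSome_iff_exists.mp hs
    have := pvW_add_lt rules seen sym rhs (by simpa using h2) hrhs
    simp only [hrhs, Option.getD_some, List.length_append, List.length_cons]
    omega
  · simp only [List.length_cons]; omega

def expand_rule_py_alt (rule : String) (rules : List (String × List String)) (seen : Option (List String)) : List String :=
  let seen0 : List String := match seen with | none => [] | some s => s
  if seen0.contains rule then []
  else
    let seen1 := PySem.Set.add seen0 rule
    match (PySem.Dict.mk rules).get? rule with
    | none => []
    | some rhs => if rhs = [] then [] else pvStackB rules rhs [] seen1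

-- ===== PRECONDITION & SPEC =====
def Spec_expand_rule_py (rule : String) (rules : List (String × List String)) (seen : Option (List String)) (out : List String) : Prop := out = expand_rule_py_alt rule rules seen
instance (rule : String) (rules : List (String × List String)) (seen : Option (List String)) (out : List String) : Decidable (Spec_expand_rule_py rule rules seen out) := by unfold Spec_expand_rule_py; infer_instance

-- ===== CLAIM (what is proved, stated in full; the proofs are below) =====
def Claim_equal_expand_rule_py : Prop := ∀ (rule : String) (rules : List (String × List String)) (seen : Option (List String)), Dom_expand_rule_py rule rules seen → Spec_expand_rule_py rule rules seen (expand_rule_py rule rules seen)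

-- ===== LEMMAS AND PROOFS =====

-- number of rule entries whose key is not yet seen: the fuel bound for A's recursion
def pvUnseen (rules : List (String × List String)) (seen : List String) : Nat :=
  (rules.filter (fun p => !seen.contains p.1)).length

theorem pvUnseen_cons (p : String × List String) (rs : List (String × List String)) (t : List String) :
    pvUnseen (p :: rs) t = (if t.contains p.1 = true then 0 else 1) + pvUnseen rs t := by
  unfold pvUnseen
  rw [List.filter_cons]
  by_cases h : t.contains p.1 = true
  · rw [h]; simp
  · have h' : t.contains p.1 = false := by simpa using h
    rw [h']; simp [Nat.add_comm]

theorem pvUnseen_le_of_subset (rules : List (String × List String)) (s s' : List String)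
    (h : ∀ x, s.contains x = true → s'.contains x = true) : pvUnseen rules s' ≤ pvUnseen rules s := by
  induction rules with
  | nil => simp [pvUnseen]
  | cons p rs ih =>
    rw [pvUnseen_cons, pvUnseen_cons]
    have : (if s'.contains p.1 = true then 0 else 1) ≤ (if s.contains p.1 = true then 0 else 1) := by
      by_cases hc : s.contains p.1 = true
      · rw [if_pos hc, if_pos (h _ hc)]
      · rw [if_neg hc]; split <;> omega
    omega

theorem pvUnseen_add_lt (rules : List (String × List String)) (seen : List String) (sym : String)
    (h1 : seen.contains sym = false) (h2 : (PySem.Dict.mk rules).contains sym = true) :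
    pvUnseen rules (PySem.Set.add seen sym) + 1 ≤ pvUnseen rules seen := by
  induction rules with
  | nil => simp [PySem.Dict.contains] at h2
  | cons p rs ih =>
    have hsub : ∀ x, List.contains seen x = true → List.contains (PySem.Set.add seen sym) x = true := by
      intro x hx; rw [pvContains_add, hx]; rfl
    have hmono : pvUnseen rs (PySem.Set.add seen sym) ≤ pvUnseen rs seen := pvUnseen_le_of_subset rs seen _ hsub
    rw [pvUnseen_cons, pvUnseen_cons]
    by_cases hk : (p.1 == sym) = true
    · have hk' : p.1 = sym := by simpa using hk
      rw [hk', h1]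
      have hT : List.contains (PySem.Set.add seen sym) sym = true := by
        rw [pvContains_add, h1]; simp
      rw [hT, if_pos rfl, if_neg (by simp)]
      omega
    · have h2' : (PySem.Dict.mk rs).contains sym = true := by
        simp only [PySem.Dict.contains, List.any_cons, hk, Bool.false_or] at h2
        exact h2
      have hrec := ih h2'
      have hkf : (p.1 == sym) = false := by simpa using hk
      have hsame : List.contains (PySem.Set.add seen sym) p.1 = List.contains seen p.1 := by
        rw [pvContains_add, hkf]; simp
      rw [hsame]
      omega

theorem pvUnseen_le_len (rules : List (String × List String)) (seen : List String) :
    pvUnseen rules seen ≤ rules.length :=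
  le_trans (List.length_filter_le _ _) (le_refl _)

-- A's seen-set only grows
theorem pvMono (f : Nat) (rules : List (String × List String)) :
    (∀ rule seen x, List.contains seen x = true → List.contains (pvExpandA rules f rule seen).2 x = true) ∧
    (∀ rhs out seen x, List.contains seen x = true → List.contains (pvLoopA rules f rhs out seen).2 x = true) := by
  induction f with
  | zero =>
    constructor
    · intro rule seen x hx
      simpa only [pvExpandA] using hx
    · intro rhs
      induction rhs with
      | nil => intro out seen x hx; simpa [pvLoopA] using hx
      | cons sym rest ih =>
        intro out seen x hx
        rw [pvLoopA]
        by_cases hc : (PySem.Dict.mk rules).contains sym = true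
        · rw [if_pos hc]
          exact ih _ _ x (by simpa only [pvExpandA] using hx)
        · rw [if_neg hc]; exact ih _ _ x hx
  | succ f ihf =>
    have hE : ∀ rule seen x, List.contains seen x = true → List.contains (pvExpandA rules (f+1) rule seen).2 x = true := by
      intro rule seen x hx
      rw [pvExpandA]
      by_cases hc : List.contains seen rule = true
      · rw [if_pos hc]; exact hx
      · rw [if_neg hc]
        have hx1 : List.contains (PySem.Set.add seen rule) x = true := by rw [pvContains_add, hx]; rfl
        cases hget : (PySem.Dict.mk rules).get? rule with
        | none => simpa using hx1
        | some rhs =>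
          dsimp only
          by_cases he : rhs = []
          · rw [if_pos he]; exact hx1
          · rw [if_neg he]
            exact ihf.2 rhs [] _ x hx1
    refine ⟨hE, ?_⟩
    intro rhs
    induction rhs with
    | nil => intro out seen x hx; simpa [pvLoopA] using hx
    | cons sym rest ih =>
      intro out seen x hx
      rw [pvLoopA]
      by_cases hc : (PySem.Dict.mk rules).contains sym = true
      · rw [if_pos hc]
        exact ih _ _ x (hE sym seen x hx)
      · rw [if_neg hc]; exact ih _ _ x hx

-- the loop's `out` parameter is a pure accumulator
theorem pvLoopA_acc (rules : List (String × List String)) (f : Nat) (rhs out seen : List String) :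
    pvLoopA rules f rhs out seen = (out ++ (pvLoopA rules f rhs [] seen).1, (pvLoopA rules f rhs [] seen).2) := by
  induction rhs generalizing out seen with
  | nil => simp [pvLoopA]
  | cons sym rest ih =>
    rw [pvLoopA, pvLoopA]
    by_cases hc : (PySem.Dict.mk rules).contains sym = true
    · rw [if_pos hc, if_pos hc]
      rw [ih (out ++ (pvExpandA rules f sym seen).1), ih ([] ++ (pvExpandA rules f sym seen).1)]
      simp
    · rw [if_neg hc, if_neg hc]
      rw [ih (out ++ [sym]), ih ([] ++ [sym])]
      simp

-- key bridge: running B's stack machine on `rhs ++ rest` performs A's loop over rhs, then continues with rest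
theorem pvBridge (rules : List (String × List String)) :
    ∀ (f : Nat) (rhs rest out seen : List String), pvUnseen rules seen ≤ f →
      pvStackB rules (rhs ++ rest) out seen =
        pvStackB rules rest (pvLoopA rules f rhs out seen).1 (pvLoopA rules f rhs out seen).2 := by
  intro f
  induction f with
  | zero =>
    intro rhs
    induction rhs with
    | nil => intro rest out seen h; simp [pvLoopA]
    | cons sym r ih =>
      intro rest out seen h
      rw [List.cons_append, pvStackB, pvLoopA]
      by_cases hc : (PySem.Dict.mk rules).contains sym = true
      · have hs : List.contains seen sym = true := by
          by_contra hno
          have h0 := pvUnseen_add_lt rules seen sym (by simpa using hno) hc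
          omega
        rw [dif_pos hc, dif_pos hs, if_pos hc]
        simp only [pvExpandA]
        simpa using ih rest out seen h
      · rw [dif_neg hc, if_neg hc]
        exact ih rest (out ++ [sym]) seen h
  | succ f ihf =>
    intro rhs
    induction rhs with
    | nil => intro rest out seen h; simp [pvLoopA]
    | cons sym r ih =>
      intro rest out seen h
      rw [List.cons_append, pvStackB, pvLoopA]
      by_cases hc : (PySem.Dict.mk rules).contains sym = true
      · rw [dif_pos hc, if_pos hc]
        by_cases hs : List.contains seen sym = true
        · rw [dif_pos hs]
          have hEseen : pvExpandA rules (f+1) sym seen = ([], seen) := by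
            rw [pvExpandA, if_pos hs]
          rw [hEseen]
          simpa using ih rest out seen h
        · rw [dif_neg hs]
          have hsome : ((PySem.Dict.mk rules).get? sym).isSome = true := by
            rw [← PySem.Dict.contains_eq_isSome_get?]; exact hc
          obtain ⟨rhsS, hget⟩ := Option.isSome_iff_exists.mp hsome
          have hsF : List.contains seen sym = false := by simpa using hs
          have hlt := pvUnseen_add_lt rules seen sym hsF hc
          have hE : pvExpandA rules (f+1) sym seen = pvLoopA rules f rhsS [] (PySem.Set.add seen sym) := by
            rw [pvExpandA, if_neg hs]
            simp only [hget]
            by_cases he : rhsS = [] <;> simp [he, pvLoopA]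
          rw [hE, hget]
          simp only [Option.getD_some]
          have h1 : pvUnseen rules (PySem.Set.add seen sym) ≤ f := by omega
          rw [ihf rhsS (r ++ rest) out (PySem.Set.add seen sym) h1]
          rw [pvLoopA_acc rules f rhsS out (PySem.Set.add seen sym)]
          have hsub : ∀ x, List.contains seen x = true →
              List.contains ((pvLoopA rules f rhsS [] (PySem.Set.add seen sym)).2) x = true := by
            intro x hx
            exact (pvMono f rules).2 rhsS [] _ x (by rw [pvContains_add, hx]; rfl)
          have h2 : pvUnseen rules (pvLoopA rules f rhsS [] (PySem.Set.add seen sym)).2 ≤ f + 1 :=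
            le_trans (pvUnseen_le_of_subset rules seen _ hsub) h
          simpa using ih rest (out ++ (pvLoopA rules f rhsS [] (PySem.Set.add seen sym)).1)
            (pvLoopA rules f rhsS [] (PySem.Set.add seen sym)).2 h2
      · rw [dif_neg hc, if_neg hc]
        exact ih rest (out ++ [sym]) seen h

-- the two top-level bodies agree for any initial seen list
theorem pvTop (rule : String) (rules : List (String × List String)) (seen0 : List String) :
    (pvExpandA rules (rules.length + 1) rule seen0).1 =
      (if seen0.contains rule then []
       else
         match (PySem.Dict.mk rules).get? rule with
         | none => []
         | some rhs => if rhs = [] then [] else pvStackB rules rhs [] (PySem.Set.add seen0 rule)) := by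
  rw [pvExpandA]
  by_cases hc : List.contains seen0 rule = true
  · rw [if_pos hc, if_pos hc]
  · rw [if_neg hc, if_neg hc]
    cases hget : (PySem.Dict.mk rules).get? rule with
    | none => dsimp only
    | some rhs =>
      dsimp only
      by_cases he : rhs = []
      · rw [if_pos he, if_pos he]
      · rw [if_neg he, if_neg he]
        have h : pvUnseen rules (PySem.Set.add seen0 rule) ≤ rules.length := pvUnseen_le_len rules _
        have hb := pvBridge rules rules.length rhs [] [] (PySem.Set.add seen0 rule) h
        rw [List.append_nil] at hb
        rw [hb, pvStackB]

-- ===== VERDICT (by name: the statement is the Claim_ definition above) =====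
theorem expand_rule_py_spec : Claim_equal_expand_rule_py := by
  unfold Claim_equal_expand_rule_py
  intro rule rules seen _
  unfold Spec_expand_rule_py expand_rule_py expand_rule_py_alt
  cases seen with
  | none => exact pvTop rule rules []
  | some s => exact pvTop rule rules s
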